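-- pv_equiv track=rewrite | github.com/vamsi-8096/IBS_2-Lab | transcription-translation.py | translation1
-- ===== SOURCE A (Python) =====
-- def translation1(rna):
--     codon_table = {
--         'ATA': 'I', 'ATC': 'I', 'ATT': 'I', 'ATG': 'M',
--         'ACA': 'T', 'ACC': 'T', 'ACG': 'T', 'ACT': 'T',
--         'AAC': 'N', 'AAT': 'N', 'AAA': 'K', 'AAG': 'K',
--         'AGC': 'S', 'AGT': 'S', 'AGA': 'R', 'AGG': 'R',
--         'CTA': 'L', 'CTC': 'L', 'CTG': 'L', 'CTT': 'L',
--         'CCA': 'P', 'CCC': 'P', 'CCG': 'P', 'CCT': 'P',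
--         'CAC': 'H', 'CAT': 'H', 'CAA': 'Q', 'CAG': 'Q',
--         'CGA': 'R', 'CGC': 'R', 'CGG': 'R', 'CGT': 'R',
--         'GTA': 'V', 'GTC': 'V', 'GTG': 'V', 'GTT': 'V',
--         'GCA': 'A', 'GCC': 'A', 'GCG': 'A', 'GCT': 'A',
--         'GAC': 'D', 'GAT': 'D', 'GAA': 'E', 'GAG': 'E',
--         'GGA': 'G', 'GGC': 'G', 'GGG': 'G', 'GGT': 'G',
--         'TCA': 'S', 'TCC': 'S', 'TCG': 'S', 'TCT': 'S',
--         'TTC': 'F', 'TTT': 'F', 'TTA': 'L', 'TTG': 'L',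
--         'TAC': 'Y', 'TAT': 'Y', 'TAA': '*', 'TAG': '*',  # STOP
--         'TGC': 'C', 'TGT': 'C', 'TGA': '*', 'TGG': 'W',  # STOP/Trp
--     }
--
--     protein = ""
--     for i in range(0, len(rna), 3):
--         codon = rna[i:i+3]
--         amino_acid = codon_table.get(codon, 'X')
--         if amino_acid == '*':
--             break
--         protein += amino_acid
--
--     return protein
-- ===== SOURCE B (Python) =====
-- def translation1(rna):
--     # Single left-to-right pass over the characters: each codon is encoded as a
--     # base-4 number (A=0, C=1, G=2, T=3) and decoded through a flat 64-entry
--     # amino-acid string; no dict and no slicing.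
--     BASE = {'A': 0, 'C': 1, 'G': 2, 'T': 3}
--     AA = "KNKNTTTTRSRSIIMIQHQHPPPPRRRRLLLLEDEDAAAAGGGGVVVV*Y*YSSSS*CWCLFLF"
--     out = []
--     idx = 0
--     valid = True
--     count = 0
--     for ch in rna:
--         b = BASE.get(ch)
--         if b is None:
--             valid = False
--         else:
--             idx = idx * 4 + b
--         count += 1
--         if count == 3:
--             aa = AA[idx] if valid else 'X'
--             if aa == '*':
--                 return ''.join(out)
--             out.append(aa)
--             idx = 0
--             valid = True
--             count = 0
--     if count:
--         out.append('X')
--     return ''.join(out)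
-- ===== Notes on version B (the rewrite author's own statement) =====
-- stated objective: alternative
-- what changed: Replaces the stride-3 slicing loop with 64-entry dict lookups by a single character-level pass that encodes each codon as a base-4 number (A=0,C=1,G=2,T=3, with a validity flag for other characters) and decodes it through a flat 64-character amino-acid table.
import Mathlib
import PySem

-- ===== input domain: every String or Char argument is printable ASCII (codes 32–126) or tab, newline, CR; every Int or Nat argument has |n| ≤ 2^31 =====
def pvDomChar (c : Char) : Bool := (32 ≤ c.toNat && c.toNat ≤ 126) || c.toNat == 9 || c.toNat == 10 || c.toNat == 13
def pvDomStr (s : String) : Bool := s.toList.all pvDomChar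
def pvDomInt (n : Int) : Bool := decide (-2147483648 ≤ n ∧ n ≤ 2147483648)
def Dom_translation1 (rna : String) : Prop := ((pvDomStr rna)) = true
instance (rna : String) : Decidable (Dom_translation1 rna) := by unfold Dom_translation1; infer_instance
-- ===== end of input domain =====

-- B replaces A's codon-slicing loop with dict lookups by a single character-level
-- automaton: each codon is encoded as a base-4 number and decoded through a flat
-- 64-entry table (objective: alternative algorithm/data structure, same cost).

-- ===== PORT A =====
-- The codon dict literal of Source A.
def pvCodonTable : PySem.Dict String String := PySem.Dict.ofList [
  ("ATA", "I"), ("ATC", "I"), ("ATT", "I"), ("ATG", "M"),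
  ("ACA", "T"), ("ACC", "T"), ("ACG", "T"), ("ACT", "T"),
  ("AAC", "N"), ("AAT", "N"), ("AAA", "K"), ("AAG", "K"),
  ("AGC", "S"), ("AGT", "S"), ("AGA", "R"), ("AGG", "R"),
  ("CTA", "L"), ("CTC", "L"), ("CTG", "L"), ("CTT", "L"),
  ("CCA", "P"), ("CCC", "P"), ("CCG", "P"), ("CCT", "P"),
  ("CAC", "H"), ("CAT", "H"), ("CAA", "Q"), ("CAG", "Q"),
  ("CGA", "R"), ("CGC", "R"), ("CGG", "R"), ("CGT", "R"),
  ("GTA", "V"), ("GTC", "V"), ("GTG", "V"), ("GTT", "V"),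
  ("GCA", "A"), ("GCC", "A"), ("GCG", "A"), ("GCT", "A"),
  ("GAC", "D"), ("GAT", "D"), ("GAA", "E"), ("GAG", "E"),
  ("GGA", "G"), ("GGC", "G"), ("GGG", "G"), ("GGT", "G"),
  ("TCA", "S"), ("TCC", "S"), ("TCG", "S"), ("TCT", "S"),
  ("TTC", "F"), ("TTT", "F"), ("TTA", "L"), ("TTG", "L"),
  ("TAC", "Y"), ("TAT", "Y"), ("TAA", "*"), ("TAG", "*"),
  ("TGC", "C"), ("TGT", "C"), ("TGA", "*"), ("TGG", "W")]

-- A's for-loop over range(0, len, 3) with the early `break` on a stop codon;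
-- the growing Python string `protein` is carried as its character list.
def translation1Go (cs : List Char) (idxs : List Int) (protein : List Char) : List Char :=
  match idxs with
  | [] => protein
  | i :: is =>
    let codon := String.ofList (PySem.List.slice cs (some i) (some (i + 3)))
    let amino := PySem.Dict.getD pvCodonTable codon "X"
    if amino = "*" then protein
    else translation1Go cs is (protein ++ amino.toList)

def translation1 (rna : String) : String :=
  String.ofList (translation1Go rna.toList (PySem.List.pyRange 0 (PySem.Str.len rna) 3) [])

-- ===== PORT B =====
-- Source B's BASE dict literal (keys are the one-character strings iterated off rna).
def pvBaseDict : PySem.Dict Char Int :=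
  PySem.Dict.ofList [('A', 0), ('C', 1), ('G', 2), ('T', 3)]

-- Source B's flat 64-entry amino-acid string AA.
def pvAA : List Char :=
  "KNKNTTTTRSRSIIMIQHQHPPPPRRRRLLLLEDEDAAAAGGGGVVVV*Y*YSSSS*CWCLFLF".toList

-- Source B's for-loop over the characters with its early `return` on '*';
-- state = (out, idx, valid, count); AA[idx] is PySem.List.pyGet? (idx is always
-- in range in Python, so the `none` arm of the getD is never taken).
def translation1AltGo (cs : List Char) (out : List Char) (idx : Int) (valid : Bool)
    (count : Nat) : List Char :=
  match cs with
  | [] => if count ≠ 0 then out ++ ['X'] else out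
  | ch :: rest =>
    let st :=
      match PySem.Dict.get? pvBaseDict ch with
      | none => (idx, false)
      | some b => (idx * 4 + b, valid)
    let count' := count + 1
    if count' = 3 then
      let aa := if st.2 then (PySem.List.pyGet? pvAA st.1).getD 'X' else 'X'
      if aa = '*' then out
      else translation1AltGo rest (out ++ [aa]) 0 true 0
    else translation1AltGo rest out st.1 st.2 count'

def translation1_alt (rna : String) : String :=
  String.ofList (translation1AltGo rna.toList [] 0 true 0)

-- ===== PRECONDITION & SPEC =====
def Spec_translation1 (rna : String) (out : String) : Prop := out = translation1_alt rna
instance (rna : String) (out : String) : Decidable (Spec_translation1 rna out) := by unfold Spec_translation1; infer_instance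

-- ===== CLAIM (what is proved, stated in full; the proofs are below) =====
def Claim_equal_translation1 : Prop := ∀ (rna : String), Dom_translation1 rna → Spec_translation1 rna (translation1 rna)

-- ===== LEMMAS AND PROOFS =====

-- A key of pvCodonTable is three characters, all in ACGT; any other string misses.
set_option maxRecDepth 8192 in
theorem pv_badKey (s : String)
    (h : s.toList.length ≠ 3 ∨ ∃ c ∈ s.toList, c ∉ (['A', 'C', 'G', 'T'] : List Char)) :
    PySem.Dict.getD pvCodonTable s "X" = "X" := by
  apply PySem.Dict.getD_of_not_contains
  rw [← Bool.not_eq_true, PySem.Dict.contains_iff_mem_keys]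
  intro hmem
  have hall : pvCodonTable.keys.all
      (fun k => k.toList.length == 3 && k.toList.all (['A', 'C', 'G', 'T'].contains ·)) = true := by
    decide
  rw [List.all_eq_true] at hall
  have hk := hall s hmem
  rw [Bool.and_eq_true, beq_iff_eq, List.all_eq_true] at hk
  obtain ⟨hlen, hchars⟩ := hk
  have hchars' : ∀ c ∈ s.toList, c ∈ (['A', 'C', 'G', 'T'] : List Char) := by
    intro c hcm
    have := hchars c hcm
    simpa [List.contains_eq_mem] using this
  rcases h with h | ⟨c, hc, hnc⟩
  · exact h hlen
  · exact hnc (hchars' c hc)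

-- Short final fragment (1 or 2 chars): both loops emit exactly 'X'.
theorem pv_base_none (c : Char) (h : c ∉ (['A', 'C', 'G', 'T'] : List Char)) :
    PySem.Dict.get? pvBaseDict c = none := by
  rw [PySem.Dict.get?_eq_none_iff_not_mem_keys]
  simpa [show pvBaseDict.keys = ['A', 'C', 'G', 'T'] from by decide] using h

theorem pv_short1 (a : Char) (out : List Char) :
    translation1AltGo [a] out 0 true 0 = out ++ ['X'] := by
  cases hga : PySem.Dict.get? pvBaseDict a <;> simp [translation1AltGo]

theorem pv_short2 (a b : Char) (out : List Char) :
    translation1AltGo [a, b] out 0 true 0 = out ++ ['X'] := by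
  cases hga : PySem.Dict.get? pvBaseDict a <;>
    cases hgb : PySem.Dict.get? pvBaseDict b <;>
      simp [translation1AltGo]

-- One full codon step of B's automaton computes exactly A's dict lookup.
set_option maxRecDepth 8192 in
theorem pv_chunk3 (a b c : Char) (rest out : List Char) :
    translation1AltGo (a :: b :: c :: rest) out 0 true 0 =
      if PySem.Dict.getD pvCodonTable (String.ofList [a, b, c]) "X" = "*" then out
      else translation1AltGo rest
        (out ++ (PySem.Dict.getD pvCodonTable (String.ofList [a, b, c]) "X").toList) 0 true 0 := by
  by_cases ha : a ∈ (['A', 'C', 'G', 'T'] : List Char)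
  · by_cases hb : b ∈ (['A', 'C', 'G', 'T'] : List Char)
    · by_cases hc : c ∈ (['A', 'C', 'G', 'T'] : List Char)
      · fin_cases ha <;> fin_cases hb <;> fin_cases hc <;> rfl
      · rw [pv_badKey _ (Or.inr ⟨c, by simp, hc⟩)]
        cases hga : PySem.Dict.get? pvBaseDict a <;>
          cases hgb : PySem.Dict.get? pvBaseDict b <;>
            simp [translation1AltGo, hga, hgb, pv_base_none c hc]
    · rw [pv_badKey _ (Or.inr ⟨b, by simp, hb⟩)]
      cases hga : PySem.Dict.get? pvBaseDict a <;>
        cases hgc : PySem.Dict.get? pvBaseDict c <;>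
          simp [translation1AltGo, hga, hgc, pv_base_none b hb]
  · rw [pv_badKey _ (Or.inr ⟨a, by simp, ha⟩)]
    cases hgb : PySem.Dict.get? pvBaseDict b <;>
      cases hgc : PySem.Dict.get? pvBaseDict c <;>
        simp [translation1AltGo, hgb, hgc, pv_base_none a ha]

-- range(0, n, 3) for n >= 3 splits off its first index.
theorem pv_range_step (n : Nat) (h : 3 ≤ n) :
    PySem.List.pyRange 0 (n : Int) 3 =
      0 :: (PySem.List.pyRange 0 ((n : Int) - 3) 3).map (· + 3) := by
  rw [PySem.List.pyRange_of_pos 0 (n : Int) (by norm_num : (0:Int) < 3),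
    PySem.List.pyRange_of_pos 0 ((n : Int) - 3) (by norm_num : (0:Int) < 3)]
  have h1 : (0:Int) < n := by exact_mod_cast Nat.lt_of_lt_of_le (by norm_num) h
  rw [if_pos h1]
  have hm : (((n : Int) - 0 + 3 - 1) / 3).toNat
      = (if (0:Int) < (n:Int) - 3 then (((n:Int) - 3 - 0 + 3 - 1) / 3).toNat else 0) + 1 := by
    split_ifs <;> omega
  rw [hm, List.range_succ_eq_map, List.map_cons, List.map_map, List.map_map]
  refine List.cons_eq_cons.mpr ⟨by norm_num, ?_⟩
  apply List.map_congr_left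
  intro k hk
  simp only [Function.comp_apply]
  push_cast
  ring


theorem pv_slice_shift (cs : List Char) (i : Int) (hi : 0 ≤ i) :
    PySem.List.slice cs (some (i + 3)) (some (i + 3 + 3)) =
      PySem.List.slice (cs.drop 3) (some i) (some (i + 3)) := by
  rw [PySem.List.slice_toNat cs (by omega) (by omega), PySem.List.slice_toNat (cs.drop 3) hi (by omega)]
  rw [List.drop_drop]
  congr 1
  · omega
  · congr 1
    omega

theorem pv_shift (idxs : List Int) (cs : List Char) (protein : List Char)
    (hpos : ∀ i ∈ idxs, 0 ≤ i) :
    translation1Go cs (idxs.map (· + 3)) protein =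
      translation1Go (cs.drop 3) idxs protein := by
  induction idxs generalizing protein with
  | nil => rfl
  | cons i is ih =>
    have hi := hpos i (by simp)
    simp only [List.map_cons, translation1Go]
    rw [pv_slice_shift cs i hi]
    split_ifs with hstop
    · rfl
    · exact ih _ (fun j hj => hpos j (by simp [hj]))



theorem pv_main (n : Nat) : ∀ cs : List Char, cs.length ≤ n → ∀ out : List Char,
    translation1Go cs (PySem.List.pyRange 0 (cs.length : Int) 3) out =
      translation1AltGo cs out 0 true 0 := by
  induction n with
  | zero =>
    intro cs hlen out
    have h0 : cs = [] := List.eq_nil_of_length_eq_zero (by omega)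
    subst h0; rfl
  | succ n ih =>
    intro cs hlen out
    match cs with
    | [] => rfl
    | [a] =>
      rw [show ((([a] : List Char).length : Int)) = 1 from by simp,
        show PySem.List.pyRange 0 1 3 = [0] from by decide]
      simp only [translation1Go]
      rw [show PySem.List.slice [a] (some 0) (some (0 + 3)) = [a] from by
        rw [PySem.List.slice_toNat [a] (by omega) (by omega)]; rfl]
      rw [pv_badKey (String.ofList [a]) (Or.inl (by simp)), if_neg (by decide), pv_short1]
      rfl
    | [a, b] =>
      rw [show ((([a, b] : List Char).length : Int)) = 2 from by simp,
        show PySem.List.pyRange 0 2 3 = [0] from by decide]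
      simp only [translation1Go]
      rw [show PySem.List.slice [a, b] (some 0) (some (0 + 3)) = [a, b] from by
        rw [PySem.List.slice_toNat [a, b] (by omega) (by omega)]; rfl]
      rw [pv_badKey (String.ofList [a, b]) (Or.inl (by simp)), if_neg (by decide), pv_short2]
      rfl
    | a :: b :: c :: rest =>
      have h3 : 3 ≤ (a :: b :: c :: rest).length := by simp
      rw [pv_range_step _ h3, pv_chunk3]
      simp only [translation1Go]
      rw [show PySem.List.slice (a :: b :: c :: rest) (some 0) (some (0 + 3)) = [a, b, c] from by
        rw [PySem.List.slice_toNat _ (by omega) (by omega)]; rfl]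
      split_ifs with hstop
      · rfl
      · rw [show (((a :: b :: c :: rest).length : Int) - 3) = (rest.length : Int) from by
          simp; omega]
        rw [pv_shift _ _ _ (fun i hi =>
          ((PySem.List.mem_pyRange_iff_of_pos (by norm_num) i).mp hi).1)]
        exact ih rest (by simp at hlen; omega) _

-- ===== VERDICT (by name: the statement is the Claim_ definition above) =====
theorem translation1_spec : Claim_equal_translation1 := by
  intro rna _
  unfold Spec_translation1 translation1 translation1_alt
  simp only [PySem.Str.len_eq]
  rw [pv_main rna.toList.length rna.toList le_rfl]
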